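-- pv_equiv track=rewrite | github.com/Collin8432/Invisible | app.py | checkPerms
-- ===== SOURCE A (Python) =====
-- from operator import contains
--
-- def checkPerms(perms):
--    ALL_PERMS = {
--       "CREATE_INSTANT_INVITE": 0x1,
--       "KICK_MEMBERS": 0x2,
--       "BAN_MEMBERS": 0x4,
--       "ADMINISTRATOR": 0x8,
--       "MANAGE_CHANNELS": 0x10,
--       "MANAGE_GUILD": 0x20,
--       "ADD_REACTIONS": 0x40,
--       "VIEW_AUDIT_LOG": 0x80,
--       "PRIORITY_SPEAKER": 0x100,
--       "STREAM": 0x200,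
--       "VIEW_CHANNEL": 0x400,
--       "SEND_MESSAGES": 0x800,
--       "SEND_TTS_MESSAGES": 0x1000,
--       "MANAGE_MESSAGES": 0x2000,
--       "EMBED_LINKS": 0x4000,
--       "ATTACH_FILES": 0x8000,
--       "READ_MESSAGE_HISTORY": 0x10000,
--       "MENTION_EVERYONE": 0x20000,
--       "USE_EXTERNAL_EMOJIS": 0x40000,
--       "VIEW_GUILD_INSIGHTS": 0x80000,
--       "CONNECT": 0x100000,
--       "SPEAK": 0x200000,
--       "MUTE_MEMBERS": 0x400000,
--       "DEAFEN_MEMBERS": 0x800000,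
--       "MOVE_MEMBERS": 0x1000000,
--       "USE_VAD": 0x2000000,
--       "CHANGE_NICKNAME": 0x4000000,
--       "MANAGE_NICKNAMES": 0x8000000,
--       "MANAGE_ROLES": 0x10000000,
--       "MANAGE_WEBHOOKS": 0x20000000,
--       "MANAGE_EMOJIS_AND_STICKERS": 0x40000000,
--       "USE_APPLICATION_COMMANDS": 0x80000000,
--       "REQUEST_TO_SPEAK": 0x100000000,
--       "MANAGE_EVENTS": 0x200000000,
--       "MANAGE_THREADS": 0x400000000,
--       "CREATE_PUBLIC_THREADS": 0x800000000,
--       "CREATE_PRIVATE_THREADS": 0x1000000000,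
--       "USE_EXTERNAL_STICKERS": 0x2000000000,
--       "SEND_MESSAGES_IN_THREADS": 0x4000000000,
--       "USE_EMBEDDED_ACTIVITIES": 0x8000000000,
--       "MODERATE_MEMBERS": 0x10000000000,
--    }
--    has_perms = []
--
--    for p, v in ALL_PERMS.items():
--       if int(perms) & v == v:
--          has_perms.append(p.replace("_", " ").title())
--
--    if contains(has_perms, "Administrator"):
--       return True
--    else:
--       return False
-- ===== SOURCE B (Python) =====
-- def checkPerms(perms):
--     return (int(perms) & 0x8) == 0x8
-- ===== Notes on version B (the rewrite author's own statement) =====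
-- stated objective: simpler
-- what changed: Replaced the fixed permission-name dict, the loop that titlecases every matching flag name into a list, and the membership test for 'Administrator' with a single bit test of the ADMINISTRATOR bit: (perms & 0x8) == 0x8.
import Mathlib
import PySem

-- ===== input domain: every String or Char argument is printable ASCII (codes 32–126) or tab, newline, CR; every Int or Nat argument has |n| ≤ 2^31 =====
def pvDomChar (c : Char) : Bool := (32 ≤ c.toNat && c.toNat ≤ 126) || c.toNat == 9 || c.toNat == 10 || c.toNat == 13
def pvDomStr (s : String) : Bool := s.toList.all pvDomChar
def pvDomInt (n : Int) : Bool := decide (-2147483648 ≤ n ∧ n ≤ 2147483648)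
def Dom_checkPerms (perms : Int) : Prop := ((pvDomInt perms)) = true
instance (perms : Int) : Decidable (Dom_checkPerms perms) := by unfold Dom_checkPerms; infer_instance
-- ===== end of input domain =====

-- B replaces A's 41-name dict loop + titlecased-list membership test with a single
-- single bit test of the ADMINISTRATOR bit: (perms & 0x8) == 0x8 (objective: simpler).


-- ===== PORT A =====
-- Python's str.title(), hand-ported (exact on the ASCII strings it is applied to here:
-- an alphabetic char is uppercased after a non-alphabetic char, lowercased otherwise).
def pyTitleAux : Bool → List Char → List Char
  | _, [] => []
  | prevAlpha, c :: rest =>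
    (if c.isAlpha then (if prevAlpha then c.toLower else c.toUpper) else c)
      :: pyTitleAux c.isAlpha rest

-- p.replace("_", " ").title()
def titleName (p : String) : String := String.ofList (pyTitleAux false (PySem.Str.replace p "_" " ").toList)

-- A's ALL_PERMS dict literal (distinct keys), as its .items() association list.
def checkPermsAllPerms : List (String × Int) :=
  [("CREATE_INSTANT_INVITE", 0x1), ("KICK_MEMBERS", 0x2), ("BAN_MEMBERS", 0x4),
   ("ADMINISTRATOR", 0x8), ("MANAGE_CHANNELS", 0x10), ("MANAGE_GUILD", 0x20),
   ("ADD_REACTIONS", 0x40), ("VIEW_AUDIT_LOG", 0x80), ("PRIORITY_SPEAKER", 0x100),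
   ("STREAM", 0x200), ("VIEW_CHANNEL", 0x400), ("SEND_MESSAGES", 0x800),
   ("SEND_TTS_MESSAGES", 0x1000), ("MANAGE_MESSAGES", 0x2000), ("EMBED_LINKS", 0x4000),
   ("ATTACH_FILES", 0x8000), ("READ_MESSAGE_HISTORY", 0x10000), ("MENTION_EVERYONE", 0x20000),
   ("USE_EXTERNAL_EMOJIS", 0x40000), ("VIEW_GUILD_INSIGHTS", 0x80000), ("CONNECT", 0x100000),
   ("SPEAK", 0x200000), ("MUTE_MEMBERS", 0x400000), ("DEAFEN_MEMBERS", 0x800000),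
   ("MOVE_MEMBERS", 0x1000000), ("USE_VAD", 0x2000000), ("CHANGE_NICKNAME", 0x4000000),
   ("MANAGE_NICKNAMES", 0x8000000), ("MANAGE_ROLES", 0x10000000), ("MANAGE_WEBHOOKS", 0x20000000),
   ("MANAGE_EMOJIS_AND_STICKERS", 0x40000000), ("USE_APPLICATION_COMMANDS", 0x80000000),
   ("REQUEST_TO_SPEAK", 0x100000000), ("MANAGE_EVENTS", 0x200000000),
   ("MANAGE_THREADS", 0x400000000), ("CREATE_PUBLIC_THREADS", 0x800000000),
   ("CREATE_PRIVATE_THREADS", 0x1000000000), ("USE_EXTERNAL_STICKERS", 0x2000000000),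
   ("SEND_MESSAGES_IN_THREADS", 0x4000000000), ("USE_EMBEDDED_ACTIVITIES", 0x8000000000),
   ("MODERATE_MEMBERS", 0x10000000000)]

def checkPerms (perms : Int) : Bool :=
  -- int(perms) is the identity on an int argument
  let hasPerms : List String :=
    checkPermsAllPerms.foldl
      (fun acc pv =>
        if PySem.Int.band perms pv.2 == pv.2 then acc ++ [titleName pv.1] else acc) []
  if hasPerms.contains "Administrator" then true else false

-- ===== PORT B =====
def checkPerms_alt (perms : Int) : Bool := PySem.Int.band perms 0x8 == 0x8

-- ===== PRECONDITION & SPEC =====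
def Spec_checkPerms (perms : Int) (out : Bool) : Prop := out = checkPerms_alt perms
instance (perms : Int) (out : Bool) : Decidable (Spec_checkPerms perms out) := by unfold Spec_checkPerms; infer_instance

-- ===== CLAIM (what is proved, stated in full; the proofs are below) =====
def Claim_equal_checkPerms : Prop := ∀ (perms : Int), Dom_checkPerms perms → Spec_checkPerms perms (checkPerms perms)

-- ===== LEMMAS AND PROOFS =====

-- Among A's 41 entries, only the ADMINISTRATOR one titlecases to "Administrator".
theorem titleName_eq_admin : ∀ pv ∈ checkPermsAllPerms,
    titleName pv.1 = "Administrator" ↔ pv = ("ADMINISTRATOR", (8 : Int)) := by decide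

theorem checkPerms_eq (perms : Int) : checkPerms perms = checkPerms_alt perms := by
  unfold checkPerms checkPerms_alt
  rw [PySem.List.foldl_append_if (p := fun pv : String × Int => PySem.Int.band perms pv.2 == pv.2)
      (f := fun pv : String × Int => titleName pv.1)]
  simp only [List.nil_append]
  by_cases h : PySem.Int.band perms 8 = 8
  · simp [h]
    exact ⟨"ADMINISTRATOR", ⟨8, by decide, h⟩, by decide⟩
  · have hno : "Administrator" ∉
        (checkPermsAllPerms.filter (fun pv => PySem.Int.band perms pv.2 == pv.2)).map
          (fun pv : String × Int => titleName pv.1) := by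
      intro hmem
      obtain ⟨pv, hpv, htitle⟩ := List.mem_map.mp hmem
      rw [List.mem_filter] at hpv
      have := (titleName_eq_admin pv hpv.1).mp htitle
      subst this
      exact h (by simpa using hpv.2)
    simp [hno, h]

-- ===== VERDICT (by name: the statement is the Claim_ definition above) =====
theorem checkPerms_spec : Claim_equal_checkPerms := by
  intro perms _
  unfold Spec_checkPerms
  exact checkPerms_eq perms
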